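-- pv_equiv track=rewrite | github.com/frieZZerr/UJ-Python | Week-4/4_5.py | rec
-- ===== SOURCE A (Python) =====
-- def rec( L, left , right ):
-- 	temp = 0
-- 	if left != right:
-- 		temp = L[left]
-- 		L[left] = L[right]
-- 		L[right] = temp
-- 		L = rec(L, left+1, right-1)
-- 	return L
-- ===== SOURCE B (Python) =====
-- def rec(L, left, right):
--     while left != right:
--         L[left], L[right] = L[right], L[left]
--         left, right = left + 1, right - 1
--     return L
-- ===== Notes on version B (the rewrite author's own statement) =====
-- stated objective: simpler
-- what changed: A's self-recursion on the shrinking (left, right) pair is replaced by an iterative two-pointer while loop with a parallel tuple swap, removing the recursive decomposition (and its call-stack) entirely.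
import Mathlib
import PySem

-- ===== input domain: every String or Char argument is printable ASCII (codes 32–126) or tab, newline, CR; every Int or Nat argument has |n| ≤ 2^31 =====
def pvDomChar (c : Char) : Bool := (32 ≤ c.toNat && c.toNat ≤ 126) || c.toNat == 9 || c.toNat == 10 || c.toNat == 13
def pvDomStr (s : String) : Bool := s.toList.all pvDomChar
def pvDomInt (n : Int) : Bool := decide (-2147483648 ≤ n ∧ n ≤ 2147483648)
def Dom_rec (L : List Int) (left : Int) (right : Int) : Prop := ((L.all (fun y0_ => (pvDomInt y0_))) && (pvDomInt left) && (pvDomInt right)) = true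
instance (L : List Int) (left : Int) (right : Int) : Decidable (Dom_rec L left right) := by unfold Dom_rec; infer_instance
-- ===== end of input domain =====

-- B replaces A's self-recursion by an iterative in-place two-pointer while loop (objective:
-- simpler); both mutate L in place by the same swaps, the equivalence proved is about the
-- returned value.

-- ===== PORT A =====
-- literal transliteration of A's recursion: guard left != right, swap via Python indexing
-- (negative indices from the end; an out-of-range access is an IndexError, here the 'none'
-- branch, excluded by Pre_), then recurse on (left+1, right-1).
def rec (L : List Int) (left : Int) (right : Int) : List Int :=
  if left ≠ right then
    match h1 : PySem.List.pyGet? L left, h2 : PySem.List.pyGet? L right with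
    | some temp, some b =>
        rec (PySem.List.pySetD (PySem.List.pySetD L left b) right temp) (left + 1) (right - 1)
    | _, _ => L   -- Python raises IndexError here (outside Pre_)
  else L
termination_by (right + L.length + 1).toNat
decreasing_by
  have hin : PySem.Raise.InRange L.length right := by
    by_contra hc
    rw [← PySem.List.pyGet?_eq_none_iff] at hc
    simp [h2] at hc
  unfold PySem.Raise.InRange at hin
  simp [PySem.List.length_pySetD]
  omega

-- ===== PORT B =====
-- B-side helper: B's while loop as a worker over the loop state (list, i, j); the guard and
-- the parallel tuple swap (RHS reads L[j] then L[i], then both cells are assigned) are B's.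
def swapLoop (st : List Int × Int × Int) : List Int :=
  match st with
  | (cur, i, j) =>
    if i = j then cur
    else
      match hb : PySem.List.pyGet? cur j with
      | none => cur   -- Python raises IndexError here (outside Pre_)
      | some b =>
        match PySem.List.pyGet? cur i with
        | none => cur   -- Python raises IndexError here (outside Pre_)
        | some a => swapLoop (PySem.List.pySetD (PySem.List.pySetD cur i b) j a, i + 1, j - 1)
termination_by (st.2.2 + st.1.length + 1).toNat
decreasing_by
  have hin : PySem.Raise.InRange cur.length j := by
    by_contra hc
    rw [← PySem.List.pyGet?_eq_none_iff] at hc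
    simp [hb] at hc
  unfold PySem.Raise.InRange at hin
  simp [PySem.List.length_pySetD]
  omega

def rec_alt (L : List Int) (left : Int) (right : Int) : List Int := swapLoop (L, left, right)

-- ===== PRECONDITION & SPEC =====
-- Pre_: exactly the inputs on which A returns: either left == right (no access at all), or a
-- nonempty even-length gap whose endpoints are valid Python indices; everywhere else A's
-- pointers never meet and it raises IndexError (or RecursionError).
def Pre_rec (L : List Int) (left : Int) (right : Int) : Prop :=
  left = right ∨
    (left < right ∧ (right - left) % 2 = 0 ∧ -(L.length : Int) ≤ left ∧ right < (L.length : Int))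
instance (L : List Int) (left : Int) (right : Int) : Decidable (Pre_rec L left right) := by
  unfold Pre_rec; infer_instance

def pvWitness_rec : List Int × Int × Int := ([1, 2, 3, 4, 5], 0, 4)

def Spec_rec (L : List Int) (left : Int) (right : Int) (out : List Int) : Prop := out = rec_alt L left right
instance (L : List Int) (left : Int) (right : Int) (out : List Int) : Decidable (Spec_rec L left right out) := by unfold Spec_rec; infer_instance

-- ===== CLAIM (what is proved, stated in full; the proofs are below) =====
def Claim_equal_rec : Prop := ∀ (L : List Int) (left : Int) (right : Int), Dom_rec L left right → Pre_rec L left right → Spec_rec L left right (rec L left right)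

-- ===== LEMMAS AND PROOFS =====

-- A's recursion and B's loop perform the same guard, the same reads and the same two writes,
-- and continue on the same shrunk pair, so they are extensionally equal (shown by induction
-- on a bound for the loop measure).
lemma swapLoop_eq_rec (n : Nat) : ∀ (L : List Int) (i j : Int),
    (j + L.length + 1).toNat ≤ n → swapLoop (L, i, j) = rec L i j := by
  induction n with
  | zero =>
    intro L i j hn
    rw [swapLoop, rec]
    by_cases hij : i = j
    · simp [hij]
    · cases hgj : PySem.List.pyGet? L j with
      | none => simp
      | some b =>
        exfalso
        have hin : PySem.Raise.InRange L.length j := by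
          by_contra hc
          rw [← PySem.List.pyGet?_eq_none_iff] at hc
          simp [hgj] at hc
        unfold PySem.Raise.InRange at hin
        omega
  | succ m ih =>
    intro L i j hn
    rw [swapLoop, rec]
    by_cases hij : i = j
    · simp [hij]
    · simp only [if_neg hij, if_pos (by exact hij : i ≠ j)]
      cases hgj : PySem.List.pyGet? L j with
      | none => simp
      | some b =>
        cases hgi : PySem.List.pyGet? L i with
        | none => simp
        | some a =>
          have hin : PySem.Raise.InRange L.length j := by
            by_contra hc
            rw [← PySem.List.pyGet?_eq_none_iff] at hc
            simp [hgj] at hc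
          unfold PySem.Raise.InRange at hin
          have hrec := ih (PySem.List.pySetD (PySem.List.pySetD L i b) j a) (i + 1) (j - 1)
            (by simp [PySem.List.length_pySetD]; omega)
          exact hrec

-- ===== VERDICT (by name: the statement is the Claim_ definition above) =====
theorem rec_spec : Claim_equal_rec := by
  intro L left right _ _
  unfold Spec_rec rec_alt
  exact (swapLoop_eq_rec ((right + L.length + 1).toNat) L left right le_rfl).symm
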